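-- pv_equiv track=rewrite | github.com/ThomasSeewald/job-scraper | python_scrapers/email_extractor.py | prioritize_emails
-- ===== SOURCE A (Python) =====
-- from typing import List, Set, Dict
--
-- def prioritize_emails(emails: List[str], company_name: str = '') -> List[str]:
--     """Prioritize emails based on relevance"""
--     if not emails:
--         return []
--
--     # Score each email
--     scored_emails = []
--     for email in emails:
--         score = 0
--
--         # Prefer emails with company name
--         if company_name and company_name.lower() in email:
--             score += 10
--
--         # Prefer specific departments
--         if any(dept in email for dept in ['personal', 'hr', 'bewerbung', 'karriere', 'jobs']):
--             score += 5
--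
--         # Prefer .de domains for German companies
--         if email.endswith('.de'):
--             score += 2
--
--         # Penalize generic emails
--         if any(generic in email for generic in ['info@', 'kontakt@', 'mail@']):
--             score -= 2
--
--         scored_emails.append((email, score))
--
--     # Sort by score (descending) and return
--     scored_emails.sort(key=lambda x: x[1], reverse=True)
--     return [email for email, _ in scored_emails]
-- ===== SOURCE B (Python) =====
-- # All reachable scores: sums of subsets of {+10, +5, +2, -2}, listed in descending order.
-- _DESC_SCORES = [17, 15, 13, 12, 10, 8, 7, 5, 3, 2, 0, -2]
--
-- def _score(email, company_name):
--     score = 0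
--     if company_name and company_name.lower() in email:
--         score += 10
--     if any(dept in email for dept in ['personal', 'hr', 'bewerbung', 'karriere', 'jobs']):
--         score += 5
--     if email.endswith('.de'):
--         score += 2
--     if any(generic in email for generic in ['info@', 'kontakt@', 'mail@']):
--         score -= 2
--     return score
--
-- def prioritize_emails(emails, company_name=''):
--     """No sorting at all: one filtering pass per possible score value, highest first."""
--     if not emails:
--         return []
--     scores = [_score(e, company_name) for e in emails]
--     result = []
--     for s in _DESC_SCORES:
--         result.extend(e for e, sc in zip(emails, scores) if sc == s)
--     return result
-- ===== Notes on version B (the rewrite author's own statement) =====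
-- stated objective: alternative
-- what changed: Eliminates sorting entirely: a score is a sum of a subset of the four fixed weights {+10,+5,+2,-2}, so only 12 score values exist; B scores each email once, then walks a hard-coded descending table of the 12 possible values, doing one filtering pass over the (email, score) pairs per value and concatenating the matches, which preserves input order within equal scores.
import Mathlib
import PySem

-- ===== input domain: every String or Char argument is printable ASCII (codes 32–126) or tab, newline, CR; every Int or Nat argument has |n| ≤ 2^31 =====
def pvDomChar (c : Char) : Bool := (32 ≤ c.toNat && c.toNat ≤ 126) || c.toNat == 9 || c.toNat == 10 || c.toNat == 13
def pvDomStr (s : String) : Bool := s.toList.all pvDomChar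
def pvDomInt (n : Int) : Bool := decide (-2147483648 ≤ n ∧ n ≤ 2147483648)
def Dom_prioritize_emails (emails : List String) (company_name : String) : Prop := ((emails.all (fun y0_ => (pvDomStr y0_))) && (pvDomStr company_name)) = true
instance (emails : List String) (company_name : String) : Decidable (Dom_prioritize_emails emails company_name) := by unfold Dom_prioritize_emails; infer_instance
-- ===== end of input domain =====

-- B removes the sort entirely: only 12 score values are reachable (sums of subsets of
-- {+10,+5,+2,-2}), so B walks a hard-coded descending table of them, one filtering pass each
-- (alternative algorithm; same cost class).

-- shared scoring helper: the body of A's per-email scoring block (B's Python has it as _score)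
def pvScore (email : String) (company_name : String) : Int :=
  let score : Int := 0
  let score := if !(company_name == "") && PySem.Str.isIn (PySem.Str.lower company_name) email then score + 10 else score
  let score := if (["personal", "hr", "bewerbung", "karriere", "jobs"]).any (fun dept => PySem.Str.isIn dept email) then score + 5 else score
  let score := if PySem.Str.endswith email ".de" then score + 2 else score
  let score := if (["info@", "kontakt@", "mail@"]).any (fun generic => PySem.Str.isIn generic email) then score - 2 else score
  score

-- ===== PORT A =====
def prioritize_emails (emails : List String) (company_name : String) : List String :=
  if emails = [] then []
  else
    let scored_emails := emails.foldl (fun acc email => acc ++ [(email, pvScore email company_name)]) []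
    (PySem.List.sorted scored_emails (fun x => x.2) true).map (fun x => x.1)

-- ===== PORT B =====
def pvDescScores : List Int := [17, 15, 13, 12, 10, 8, 7, 5, 3, 2, 0, -2]

def prioritize_emails_alt (emails : List String) (company_name : String) : List String :=
  if emails = [] then []
  else
    let scores := emails.map (fun e => pvScore e company_name)
    pvDescScores.foldl
      (fun result s =>
        result ++ ((emails.zip scores).filter (fun p => p.2 == s)).map (fun p => p.1)) []

-- ===== PRECONDITION & SPEC =====
def Spec_prioritize_emails (emails : List String) (company_name : String) (out : List String) : Prop := out = prioritize_emails_alt emails company_name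
instance (emails : List String) (company_name : String) (out : List String) : Decidable (Spec_prioritize_emails emails company_name out) := by unfold Spec_prioritize_emails; infer_instance

-- ===== CLAIM (what is proved, stated in full; the proofs are below) =====
def Claim_equal_prioritize_emails : Prop := ∀ (emails : List String) (company_name : String), Dom_prioritize_emails emails company_name → Spec_prioritize_emails emails company_name (prioritize_emails emails company_name)

-- ===== LEMMAS AND PROOFS =====

theorem pv_insertBy_nil {α : Type} (before : α → α → Bool) (x : α) :
    PySem.List.insertBy before x [] = [x] := rfl

theorem pv_insertBy_cons {α : Type} (before : α → α → Bool) (x y : α) (ys : List α) :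
    PySem.List.insertBy before x (y :: ys) =
      if before x y then x :: y :: ys else y :: PySem.List.insertBy before x ys := rfl

theorem pv_insertBy_append {α : Type} (before : α → α → Bool) (x : α) (l1 l2 : List α)
    (h : ∀ y ∈ l1, before x y = false) :
    PySem.List.insertBy before x (l1 ++ l2) = l1 ++ PySem.List.insertBy before x l2 := by
  induction l1 with
  | nil => simp
  | cons y ys ih =>
    have hy : before x y = false := h y (by simp)
    simp [pv_insertBy_cons, hy, ih (fun z hz => h z (by simp [hz]))]

theorem pv_insertBy_all_true {α : Type} (before : α → α → Bool) (x : α) (l : List α)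
    (h : ∀ y ∈ l, before x y = true) :
    PySem.List.insertBy before x l = x :: l := by
  cases l with
  | nil => rfl
  | cons y ys => simp [pv_insertBy_cons, h y (by simp)]

theorem pv_flatMap_congr {α β : Type} (l : List α) (f g : α → List β)
    (h : ∀ a ∈ l, f a = g a) : l.flatMap f = l.flatMap g := by
  induction l with
  | nil => rfl
  | cons a l ih =>
    simp only [List.flatMap_cons, h a (by simp), ih (fun b hb => h b (by simp [hb]))]

theorem pv_ins_mem {α : Type} (keyf : α → Int) (x : α)
    (K : List Int) (bucket : Int → List α)
    (hpw : K.Pairwise (· > ·))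
    (hne : ∀ k ∈ K, bucket k ≠ [])
    (hkey : ∀ k ∈ K, ∀ y ∈ bucket k, keyf y = k)
    (hmem : keyf x ∈ K) :
    PySem.List.insertBy (fun a b => decide (keyf b < keyf a)) x (K.flatMap bucket)
      = K.flatMap (fun k => if k = keyf x then bucket k ++ [x] else bucket k) := by
  induction K with
  | nil => cases hmem
  | cons k K ih =>
    have hrel : ∀ k' ∈ K, k > k' := fun k' hk' => List.rel_of_pairwise_cons hpw hk'
    by_cases hkc : k = keyf x
    · have hfalse : ∀ y ∈ bucket k, (fun a b => decide (keyf b < keyf a)) x y = false := by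
        intro y hy
        have := hkey k (by simp) y hy
        simp [this, hkc]
      have htrue : ∀ y ∈ K.flatMap bucket, (fun a b => decide (keyf b < keyf a)) x y = true := by
        intro y hy
        obtain ⟨k', hk', hy'⟩ := List.mem_flatMap.mp hy
        have h2 := hkey k' (by simp [hk']) y hy'
        have h3 := hrel k' hk'
        simp [h2]
        omega
      rw [List.flatMap_cons, pv_insertBy_append _ _ _ _ hfalse, pv_insertBy_all_true _ _ _ htrue]
      have hrest : K.flatMap (fun k' => if k' = keyf x then bucket k' ++ [x] else bucket k')
          = K.flatMap bucket := by
        apply pv_flatMap_congr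
        intro k' hk'
        have h3 := hrel k' hk'
        have : k' ≠ keyf x := by omega
        simp [this]
      simp [hrest, hkc]
    · have hcK : keyf x ∈ K := by
        rcases List.mem_cons.mp hmem with h | h
        · exact absurd h.symm hkc
        · exact h
      have hgt : keyf x < k := hrel _ hcK
      have hfalse : ∀ y ∈ bucket k, (fun a b => decide (keyf b < keyf a)) x y = false := by
        intro y hy
        have := hkey k (by simp) y hy
        simp [this]
        omega
      rw [List.flatMap_cons, pv_insertBy_append _ _ _ _ hfalse,
        ih hpw.of_cons (fun k' hk' => hne k' (by simp [hk'])) (fun k' hk' => hkey k' (by simp [hk'])) hcK]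
      have hkne : ¬ (k = keyf x) := hkc
      simp [hkne]

theorem pv_ins_not_mem {α : Type} (keyf : α → Int) (x : α)
    (K : List Int) (bucket : Int → List α)
    (hpw : K.Pairwise (· > ·))
    (hne : ∀ k ∈ K, bucket k ≠ [])
    (hkey : ∀ k ∈ K, ∀ y ∈ bucket k, keyf y = k)
    (hmem : keyf x ∉ K) :
    PySem.List.insertBy (fun a b => decide (keyf b < keyf a)) x (K.flatMap bucket)
      = (PySem.List.insertBy (fun a b => decide (b < a)) (keyf x) K).flatMap
          (fun k => if k = keyf x then [x] else bucket k) := by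
  induction K with
  | nil => simp [pv_insertBy_nil]
  | cons k K ih =>
    have hrel : ∀ k' ∈ K, k > k' := fun k' hk' => List.rel_of_pairwise_cons hpw hk'
    have hkc : k ≠ keyf x := fun h => hmem (by simp [h])
    by_cases hlt : k < keyf x
    · have htrue : ∀ y ∈ (k :: K).flatMap bucket, (fun a b => decide (keyf b < keyf a)) x y = true := by
        intro y hy
        obtain ⟨k', hk', hy'⟩ := List.mem_flatMap.mp hy
        have h2 := hkey k' hk' y hy'
        have : k' ≤ k := by
          rcases List.mem_cons.mp hk' with h | h
          · omega
          · have := hrel k' h; omega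
        simp [h2]; omega
      rw [pv_insertBy_all_true _ _ _ htrue, pv_insertBy_cons]
      have : decide (k < keyf x) = true := by simp [hlt]
      simp only [this, if_pos]
      have hrest : (k :: K).flatMap (fun k' => if k' = keyf x then [x] else bucket k')
          = (k :: K).flatMap bucket := by
        apply pv_flatMap_congr
        intro k' hk'
        have : k' ≠ keyf x := fun h => hmem (h ▸ hk')
        simp [this]
      simp [List.flatMap_cons, hrest]
    · have hfalse : ∀ y ∈ bucket k, (fun a b => decide (keyf b < keyf a)) x y = false := by
        intro y hy
        have := hkey k (by simp) y hy
        simp [this]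
        omega
      rw [List.flatMap_cons, pv_insertBy_append _ _ _ _ hfalse,
        ih hpw.of_cons (fun k' hk' => hne k' (by simp [hk'])) (fun k' hk' => hkey k' (by simp [hk']))
          (fun h => hmem (by simp [h])), pv_insertBy_cons]
      have : decide (k < keyf x) = false := by simp [hlt]
      simp only [this, Bool.false_eq_true]
      simp [hkc]

theorem pv_sorted_append_singleton {α κ : Type} [LinearOrder κ] (xs : List α) (x : α) (keyf : α → κ) :
    PySem.List.sorted (xs ++ [x]) keyf true
      = PySem.List.insertBy (fun a b => decide (keyf b < keyf a)) x (PySem.List.sorted xs keyf true) := by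
  rw [PySem.List.sorted_rev_eq_foldl_insertBy, PySem.List.sorted_rev_eq_foldl_insertBy,
    List.foldl_append]
  rfl

-- A's stable reverse sort is the concatenation, over the distinct scores in descending order,
-- of the input-order sublists with that score.
theorem pv_sorted_rev_buckets {α : Type} (keyf : α → Int) (xs : List α) :
    PySem.List.sorted xs keyf true
      = (PySem.List.sorted (PySem.Set.ofList (xs.map keyf)) (fun k => k) true).flatMap
          (fun k => xs.filter (fun e => keyf e == k)) := by
  induction xs using List.reverseRecOn with
  | nil => simp [PySem.List.sorted_rev_eq_foldl_insertBy]
  | append_singleton xs x ih =>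
    have hSnodup : (PySem.Set.ofList (xs.map keyf)).Nodup := PySem.Set.nodup_ofList _
    have hKperm : (PySem.List.sorted (PySem.Set.ofList (xs.map keyf)) (fun k => k) true).Perm
        (PySem.Set.ofList (xs.map keyf)) := PySem.List.sorted_perm _ _ _
    have hKnodup : (PySem.List.sorted (PySem.Set.ofList (xs.map keyf)) (fun k => k) true).Nodup :=
      hKperm.nodup_iff.mpr hSnodup
    have hKge : (PySem.List.sorted (PySem.Set.ofList (xs.map keyf)) (fun k => k) true).Pairwise
        (fun a b => b ≤ a) := PySem.List.sorted_pairwise_rev _ _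
    have hKpw : (PySem.List.sorted (PySem.Set.ofList (xs.map keyf)) (fun k => k) true).Pairwise (· > ·) := by
      have := hKge.and hKnodup
      exact this.imp (fun h => lt_of_le_of_ne h.1 (Ne.symm h.2))
    have hmemK : ∀ k, k ∈ PySem.List.sorted (PySem.Set.ofList (xs.map keyf)) (fun k => k) true ↔
        k ∈ xs.map keyf := by
      intro k
      rw [PySem.List.mem_sorted, PySem.Set.mem_ofList]
    have hne : ∀ k ∈ PySem.List.sorted (PySem.Set.ofList (xs.map keyf)) (fun k => k) true,
        xs.filter (fun e => keyf e == k) ≠ [] := by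
      intro k hk
      obtain ⟨e, he, hek⟩ := List.mem_map.mp ((hmemK k).mp hk)
      exact List.ne_nil_of_mem (List.mem_filter.mpr ⟨he, by simp [hek]⟩)
    have hkey : ∀ k ∈ PySem.List.sorted (PySem.Set.ofList (xs.map keyf)) (fun k => k) true,
        ∀ y ∈ xs.filter (fun e => keyf e == k), keyf y = k := by
      intro k _ y hy
      have := (List.mem_filter.mp hy).2
      simpa using this
    rw [pv_sorted_append_singleton, ih]
    have hmapnew : (xs ++ [x]).map keyf = xs.map keyf ++ [keyf x] := by simp
    by_cases hcS : keyf x ∈ PySem.Set.ofList (xs.map keyf)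
    · have hcK : keyf x ∈ PySem.List.sorted (PySem.Set.ofList (xs.map keyf)) (fun k => k) true :=
        (PySem.List.mem_sorted _ _ _ _).mpr hcS
      rw [pv_ins_mem keyf x _ _ hKpw hne hkey hcK]
      have hSnew : PySem.Set.ofList ((xs ++ [x]).map keyf) = PySem.Set.ofList (xs.map keyf) := by
        rw [hmapnew, PySem.Set.ofList_append_singleton, PySem.Set.add_of_mem hcS]
      rw [hSnew]
      apply pv_flatMap_congr
      intro k hk
      by_cases hk' : k = keyf x
      · subst hk'
        simp [List.filter_append]
      · have hne2 : ¬ keyf x = k := fun h => hk' h.symm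
        simp [hk', List.filter_append, hne2]
    · have hcK : keyf x ∉ PySem.List.sorted (PySem.Set.ofList (xs.map keyf)) (fun k => k) true :=
        fun h => hcS ((PySem.List.mem_sorted _ _ _ _).mp h)
      rw [pv_ins_not_mem keyf x _ _ hKpw hne hkey hcK]
      have hSnew : PySem.Set.ofList ((xs ++ [x]).map keyf)
          = PySem.Set.ofList (xs.map keyf) ++ [keyf x] := by
        rw [hmapnew, PySem.Set.ofList_append_singleton, PySem.Set.add_of_not_mem hcS]
      rw [hSnew]
      have hKnew : PySem.List.sorted (PySem.Set.ofList (xs.map keyf) ++ [keyf x]) (fun k => k) true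
          = PySem.List.insertBy (fun a b => decide (b < a)) (keyf x)
              (PySem.List.sorted (PySem.Set.ofList (xs.map keyf)) (fun k => k) true) :=
        pv_sorted_append_singleton _ _ _
      rw [hKnew]
      apply pv_flatMap_congr
      intro k hk
      have hk2 : k = keyf x ∨ k ∈ PySem.List.sorted (PySem.Set.ofList (xs.map keyf)) (fun k => k) true := by
        have := (PySem.List.insertBy_mem_iff _ _ _ _).mp hk
        tauto
      by_cases hkx : k = keyf x
      · subst hkx
        have hnil : xs.filter (fun e => keyf e == keyf x) = [] := by
          rw [List.filter_eq_nil_iff]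
          intro e he hbe
          apply hcS
          rw [PySem.Set.mem_ofList]
          exact List.mem_map.mpr ⟨e, he, by simpa using hbe⟩
        simp [List.filter_append, hnil]
      · have hne2 : ¬ keyf x = k := fun h => hkx h.symm
        simp [hkx, List.filter_append, hne2]

theorem pv_map_fst_insertBy {α : Type} (keyf : α → Int) (x : α) (L : List (α × Int))
    (h : ∀ p ∈ L, p.2 = keyf p.1) :
    (PySem.List.insertBy (fun a b => decide (b.2 < a.2)) (x, keyf x) L).map (fun p => p.1)
      = PySem.List.insertBy (fun a b => decide (keyf b < keyf a)) x (L.map (fun p => p.1)) := by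
  induction L with
  | nil => rfl
  | cons p L ih =>
    have hp : p.2 = keyf p.1 := h p (by simp)
    by_cases hlt : keyf p.1 < keyf x
    · simp [pv_insertBy_cons, hp, hlt]
    · simp [pv_insertBy_cons, hp, hlt, ih (fun q hq => h q (by simp [hq]))]

theorem pv_sorted_pairs_fst {α : Type} (keyf : α → Int) (xs : List α) :
    (PySem.List.sorted (xs.map (fun e => (e, keyf e))) (fun p => p.2) true).map (fun p => p.1)
      = PySem.List.sorted xs keyf true := by
  induction xs using List.reverseRecOn with
  | nil => simp [PySem.List.sorted_rev_eq_foldl_insertBy]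
  | append_singleton xs x ih =>
    have hmap : (xs ++ [x]).map (fun e => (e, keyf e))
        = xs.map (fun e => (e, keyf e)) ++ [(x, keyf x)] := by simp
    rw [hmap, pv_sorted_append_singleton, pv_sorted_append_singleton]
    have h : ∀ p ∈ PySem.List.sorted (xs.map (fun e => (e, keyf e))) (fun p => p.2) true,
        p.2 = keyf p.1 := by
      intro p hp
      have := (PySem.List.mem_sorted _ _ _ _).mp hp
      obtain ⟨e, _, he⟩ := List.mem_map.mp this
      simp [← he]
    rw [pv_map_fst_insertBy keyf x _ h, ih]

-- every reachable score lies in B's fixed table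
theorem pv_score_mem (email company_name : String) : pvScore email company_name ∈ pvDescScores := by
  unfold pvScore pvDescScores
  split_ifs <;> decide

-- B's pass over the (email, score) pairs for one score is a plain filter of the emails
theorem pv_zip_filter {α : Type} (keyf : α → Int) (xs : List α) (s : Int) :
    ((xs.zip (xs.map keyf)).filter (fun p => p.2 == s)).map (fun p => p.1)
      = xs.filter (fun e => keyf e == s) := by
  induction xs with
  | nil => rfl
  | cons e es ih =>
    by_cases hs : (keyf e == s) = true
    · simp [List.zip_cons_cons, hs, ih]
    · simp [List.zip_cons_cons, hs, ih]

-- dropping elements of F whose bucket is empty leaves the flatMap unchanged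
theorem pv_flatMap_filter {α : Type} (F : List Int) (P : Int → Bool) (bucket : Int → List α)
    (h : ∀ k ∈ F, P k = false → bucket k = []) :
    F.flatMap bucket = (F.filter P).flatMap bucket := by
  induction F with
  | nil => rfl
  | cons k F ih =>
    by_cases hp : P k = true
    · simp [List.flatMap_cons, hp,
        ih (fun k' hk' => h k' (by simp [hk']))]
    · have hb := h k (by simp) (by simpa using hp)
      simp [List.flatMap_cons, hp, hb,
        ih (fun k' hk' => h k' (by simp [hk']))]

-- a strictly descending list of table entries is the table filtered to its members
theorem pv_desc_sublist (K : List Int)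
    (hpw : K.Pairwise (· > ·)) (hsub : ∀ k ∈ K, k ∈ pvDescScores) :
    pvDescScores.filter (fun k => decide (k ∈ K)) = K := by
  have hF : pvDescScores.Pairwise (· > ·) := by decide
  have h1 : (pvDescScores.filter (fun k => decide (k ∈ K))).Pairwise (· > ·) :=
    List.Pairwise.filter _ hF
  have hKnodup : K.Nodup := hpw.imp (fun h => ne_of_gt h)
  have hFnodup : (pvDescScores.filter (fun k => decide (k ∈ K))).Nodup :=
    List.Nodup.filter _ (by decide)
  have hperm : (pvDescScores.filter (fun k => decide (k ∈ K))).Perm K := by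
    rw [List.perm_ext_iff_of_nodup hFnodup hKnodup]
    intro a
    simp only [List.mem_filter, decide_eq_true_eq]
    exact ⟨fun h => h.2, fun h => ⟨hsub a h, h⟩⟩
  exact List.Perm.eq_of_pairwise (fun a b _ _ h1 h2 => absurd h2 (not_lt_of_gt h1)) h1 hpw hperm

-- ===== VERDICT (by name: the statement is the Claim_ definition above) =====
theorem prioritize_emails_spec : Claim_equal_prioritize_emails := by
  intro emails company_name _
  unfold Spec_prioritize_emails prioritize_emails prioritize_emails_alt
  by_cases h : emails = []
  · simp [h]
  · simp only [if_neg h]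
    set keyf := fun e => pvScore e company_name with hkeyf
    set K := PySem.List.sorted (PySem.Set.ofList (emails.map keyf)) (fun k => k) true with hK
    have hKperm : K.Perm (PySem.Set.ofList (emails.map keyf)) := PySem.List.sorted_perm _ _ _
    have hKnodup : K.Nodup := hKperm.nodup_iff.mpr (PySem.Set.nodup_ofList _)
    have hKge : K.Pairwise (fun a b => b ≤ a) := PySem.List.sorted_pairwise_rev _ _
    have hKpw : K.Pairwise (· > ·) :=
      (hKge.and hKnodup).imp (fun h => lt_of_le_of_ne h.1 (Ne.symm h.2))
    have hmemK : ∀ k, k ∈ K ↔ k ∈ emails.map keyf := by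
      intro k; rw [hK, PySem.List.mem_sorted, PySem.Set.mem_ofList]
    have hsub : ∀ k ∈ K, k ∈ pvDescScores := by
      intro k hk
      obtain ⟨e, _, he⟩ := List.mem_map.mp ((hmemK k).mp hk)
      exact he ▸ pv_score_mem e company_name
    have hzip : ∀ s : Int,
        ((emails.zip (emails.map keyf)).filter (fun p => p.2 == s)).map (fun p => p.1)
          = emails.filter (fun e => keyf e == s) := fun s => pv_zip_filter keyf emails s
    rw [PySem.List.foldl_append_singleton_eq_map, List.nil_append,
      pv_sorted_pairs_fst keyf emails, pv_sorted_rev_buckets keyf emails,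
      PySem.List.foldl_append_eq_flatMap, List.nil_append, ← hK,
      show (fun s => ((emails.zip (emails.map keyf)).filter (fun p => p.2 == s)).map (fun p => p.1))
        = (fun s => emails.filter (fun e => keyf e == s)) from funext hzip,
      pv_flatMap_filter pvDescScores (fun k => decide (k ∈ K))
        (fun k => emails.filter (fun e => keyf e == k))
        (by
          intro k _ hkP
          rw [List.filter_eq_nil_iff]
          intro e he hbe
          have : k ∈ K := (hmemK k).mpr (List.mem_map.mpr ⟨e, he, by simpa using hbe⟩)
          simp [this] at hkP),
      pv_desc_sublist K hKpw hsub]
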